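-- pv_equiv track=rewrite | github.com/Luklr/RI-2025 | TP4/punto7/punto7.py | vbyte_decompress
-- ===== SOURCE A (Python) =====
-- def vbyte_decompress(compressed):
--     docIDs = []
--     num = 0
--     shift = 0
--     for byte in compressed:
--         num |= (byte & 0x7F) << shift  # Añade los 7 bits al número
--         if (byte & 0x80) == 0:         # Si MSB = 0, terminamos
--             docIDs.append(num)
--             num = 0
--             shift = 0
--         else:
--             shift += 7
--     return docIDs
-- ===== SOURCE B (Python) =====
-- def vbyte_decompress(compressed):
--     docIDs = []
--     group = []
--     for byte in compressed:
--         group.append(byte)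
--         if (byte & 0x80) == 0:
--             value = 0
--             for i, b in enumerate(group):
--                 value |= (b & 0x7F) << (7 * i)
--             docIDs.append(value)
--             group = []
--     return docIDs
-- ===== Notes on version B (the rewrite author's own statement) =====
-- stated objective: alternative
-- what changed: Instead of threading an incremental num/shift accumulator through the byte loop, B collects each number's bytes into a group and, on the terminating byte (MSB clear), decodes the whole group in one enumerate-fold, dropping any unterminated trailing group exactly as A leaves it unappended.
import Mathlib
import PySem

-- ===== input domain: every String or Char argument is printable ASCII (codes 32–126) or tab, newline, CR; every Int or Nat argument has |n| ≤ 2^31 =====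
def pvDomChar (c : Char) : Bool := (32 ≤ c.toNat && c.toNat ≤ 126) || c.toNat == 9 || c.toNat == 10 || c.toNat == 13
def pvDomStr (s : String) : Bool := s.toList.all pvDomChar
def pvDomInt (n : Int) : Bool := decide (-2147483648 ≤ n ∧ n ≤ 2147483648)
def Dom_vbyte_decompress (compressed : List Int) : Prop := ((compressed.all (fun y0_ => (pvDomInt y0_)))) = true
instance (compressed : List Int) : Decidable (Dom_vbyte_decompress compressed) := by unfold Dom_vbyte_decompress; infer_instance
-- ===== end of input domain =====

-- B decodes each variable-byte group with a collect-then-fold pass instead of A's incremental num/shift accumulator; alternative decomposition, same cost.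


-- ===== PORT A =====
-- state: (docIDs, num, shift); shift is always nonnegative in the Python loop, so '<< shift' (Lean's Int '<<<', exact for nonnegative shifts) never raises
def vbyte_decompress (compressed : List Int) : List Int :=
  (compressed.foldl
    (fun (st : List Int × Int × Int) byte =>
      let docIDs := st.1
      let num := PySem.Int.bor st.2.1 ((PySem.Int.band byte 0x7F) <<< st.2.2)
      if PySem.Int.band byte 0x80 = 0 then (docIDs ++ [num], 0, 0)
      else (docIDs, num, st.2.2 + 7))
    ([], 0, 0)).1

-- ===== PORT B =====
-- value of one complete byte group, as Source B's enumerate-fold (Lean's Int '<<<', exact for the nonnegative shifts 7*i)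
def vbyteGroupValue (group : List Int) : Int :=
  (PySem.List.enumerate group).foldl
    (fun acc p => PySem.Int.bor acc ((PySem.Int.band p.2 0x7F) <<< (7 * p.1))) 0

def vbyte_decompress_alt (compressed : List Int) : List Int :=
  (compressed.foldl
    (fun (st : List Int × List Int) byte =>
      let group := st.2 ++ [byte]
      if PySem.Int.band byte 0x80 = 0 then (st.1 ++ [vbyteGroupValue group], [])
      else (st.1, group))
    ([], [])).1

-- ===== PRECONDITION & SPEC =====
def Spec_vbyte_decompress (compressed : List Int) (out : List Int) : Prop := out = vbyte_decompress_alt compressed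
instance (compressed : List Int) (out : List Int) : Decidable (Spec_vbyte_decompress compressed out) := by unfold Spec_vbyte_decompress; infer_instance

-- ===== CLAIM (what is proved, stated in full; the proofs are below) =====
def Claim_equal_vbyte_decompress : Prop := ∀ (compressed : List Int), Dom_vbyte_decompress compressed → Spec_vbyte_decompress compressed (vbyte_decompress compressed)

-- ===== LEMMAS AND PROOFS =====

-- appending a byte to a group OR-shifts its 0x7F bits at position 7 * (group length)
lemma vbyteGroupValue_snoc (group : List Int) (b : Int) :
    vbyteGroupValue (group ++ [b]) =
      PySem.Int.bor (vbyteGroupValue group)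
        ((PySem.Int.band b 0x7F) <<< (7 * (group.length : Int))) := by
  unfold vbyteGroupValue
  rw [PySem.List.enumerate_append, List.foldl_append]
  simp only [PySem.List.enumerate_cons, PySem.List.enumerate_nil, List.foldl_cons,
    List.foldl_nil, zero_add]

lemma vbyteGroupValue_nil : vbyteGroupValue [] = 0 := rfl

-- loop invariant: A's (num, shift) is B's pending group, folded
lemma vbyte_loop_eq (l : List Int) (acc : List Int) (group : List Int) :
    (l.foldl
      (fun (st : List Int × Int × Int) byte =>
        let docIDs := st.1
        let num := PySem.Int.bor st.2.1 ((PySem.Int.band byte 0x7F) <<< st.2.2)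
        if PySem.Int.band byte 0x80 = 0 then (docIDs ++ [num], 0, 0)
        else (docIDs, num, st.2.2 + 7))
      (acc, vbyteGroupValue group, (7 * group.length : Int))).1 =
    (l.foldl
      (fun (st : List Int × List Int) byte =>
        let g := st.2 ++ [byte]
        if PySem.Int.band byte 0x80 = 0 then (st.1 ++ [vbyteGroupValue g], [])
        else (st.1, g))
      (acc, group)).1 := by
  induction l generalizing acc group with
  | nil => simp
  | cons b rest ih =>
    simp only [List.foldl_cons]
    by_cases h : PySem.Int.band b 0x80 = 0
    · simp only [h, if_true]
      rw [← vbyteGroupValue_snoc]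
      have h2 := ih (acc ++ [vbyteGroupValue (group ++ [b])]) []
      simp only [vbyteGroupValue_nil, List.length_nil, Nat.cast_zero, mul_zero] at h2
      exact h2
    · simp only [h, if_false]
      have h2 := ih acc (group ++ [b])
      rw [vbyteGroupValue_snoc] at h2
      have hs : (7 * (((group ++ [b]).length : Nat) : Int)) = 7 * (group.length : Int) + 7 := by
        simp; ring
      rw [hs] at h2
      exact h2

-- ===== VERDICT (by name: the statement is the Claim_ definition above) =====
theorem vbyte_decompress_spec : Claim_equal_vbyte_decompress := by
  intro compressed _
  unfold Spec_vbyte_decompress vbyte_decompress vbyte_decompress_alt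
  have := vbyte_loop_eq compressed [] []
  simpa [vbyteGroupValue, PySem.List.enumerate] using this
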